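-- pv_equiv track=rewrite | github.com/SDV284/sdv_lab_5 | 2.py | new_add_table
-- ===== SOURCE A (Python) =====
-- def new_add_table(size):
--   table = []
--   for i in range(-size // 2 + 1, size // 2 + 1):
--     row = []
--     for j in range(-size // 2 + 1, size // 2 + 1):
--       row.append(i + j)
--     table.append(row)
--   return table
-- ===== SOURCE B (Python) =====
-- def new_add_table(size):
--     lo = -size // 2 + 1
--     hi = size // 2 + 1
--     n = hi - lo
--     if n <= 0:
--         return []
--     row = [lo + j for j in range(lo, hi)]
--     table = []
--     for _ in range(n):
--         table.append(row)
--         row = [x + 1 for x in row]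
--     return table
-- ===== Notes on version B (the rewrite author's own statement) =====
-- stated objective: alternative
-- what changed: Instead of recomputing i+j for every cell with two nested range loops, B builds the first row once and produces each subsequent row by incrementing each element of the previous row.
import Mathlib
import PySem

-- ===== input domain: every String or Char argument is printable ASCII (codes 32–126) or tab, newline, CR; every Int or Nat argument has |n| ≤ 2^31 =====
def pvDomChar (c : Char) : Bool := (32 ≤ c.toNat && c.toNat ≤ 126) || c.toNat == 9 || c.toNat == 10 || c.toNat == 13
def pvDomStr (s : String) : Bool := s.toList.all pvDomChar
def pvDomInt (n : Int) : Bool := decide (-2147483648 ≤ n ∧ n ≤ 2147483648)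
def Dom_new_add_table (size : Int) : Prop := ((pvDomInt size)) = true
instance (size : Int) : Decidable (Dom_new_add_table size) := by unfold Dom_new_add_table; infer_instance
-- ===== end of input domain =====

-- B builds the first row once and derives each next row by incrementing every
-- element of the previous row, instead of A's nested i+j recomputation (alternative decomposition).

-- ===== PORT A =====
def new_add_table (size : Int) : List (List Int) :=
  (PySem.List.pyRange (PySem.Int.floordiv (-size) 2 + 1) (PySem.Int.floordiv size 2 + 1) 1).foldl
    (fun table i =>
      table ++ [(PySem.List.pyRange (PySem.Int.floordiv (-size) 2 + 1) (PySem.Int.floordiv size 2 + 1) 1).foldl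
        (fun row j => row ++ [i + j]) []]) []

-- ===== PORT B =====
-- the 'for _ in range(n): append row; row = [x+1 for x in row]' loop of Source B
def pvRows : Nat → List Int → List (List Int)
  | 0, _ => []
  | Nat.succ k, row => row :: pvRows k (row.map (fun x => x + 1))

def new_add_table_alt (size : Int) : List (List Int) :=
  let lo := PySem.Int.floordiv (-size) 2 + 1
  let hi := PySem.Int.floordiv size 2 + 1
  let n := hi - lo
  if n ≤ 0 then []
  else pvRows n.toNat ((PySem.List.pyRange lo hi 1).map (fun j => lo + j))

-- ===== PRECONDITION & SPEC =====
def Spec_new_add_table (size : Int) (out : List (List Int)) : Prop := out = new_add_table_alt size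
instance (size : Int) (out : List (List Int)) : Decidable (Spec_new_add_table size out) := by unfold Spec_new_add_table; infer_instance

-- ===== CLAIM (what is proved, stated in full; the proofs are below) =====
def Claim_equal_new_add_table : Prop := ∀ (size : Int), Dom_new_add_table size → Spec_new_add_table size (new_add_table size)

-- ===== LEMMAS AND PROOFS =====
theorem pvRows_eq (m : Nat) : ∀ (row : List Int),
    pvRows m row = (List.range m).map (fun (k : Nat) => row.map (fun x => x + (k : Int))) := by
  induction m with
  | zero => intro row; simp [pvRows]
  | succ k ih =>
    intro row
    rw [List.range_succ_eq_map]
    simp only [pvRows, ih, List.map_cons, List.map_map]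
    congr 1
    · simp
    · apply List.map_congr_left
      intro a _
      simp only [Function.comp_apply]
      apply List.map_congr_left
      intro x _
      simp only [Function.comp_apply]
      push_cast
      ring

theorem new_add_table_spec : Claim_equal_new_add_table := by
  intro size _
  unfold Spec_new_add_table new_add_table new_add_table_alt
  set lo := PySem.Int.floordiv (-size) 2 + 1 with hlo
  set hi := PySem.Int.floordiv size 2 + 1 with hhi
  simp only [PySem.List.foldl_append_singleton_eq_map, List.nil_append]
  rw [PySem.List.pyRange_one]
  by_cases h : hi - lo ≤ 0
  · simp [h, show (hi - lo).toNat = 0 by omega]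
  · simp only [if_neg h, pvRows_eq, List.map_map]
    apply List.map_congr_left
    intro k _
    simp only [Function.comp_apply]
    apply List.map_congr_left
    intro j _
    simp only [Function.comp_apply]
    ring
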